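-- pv_equiv track=rewrite | github.com/jeffplays2005/courses | Computer Science 130/Lab 1 - Introductory Lab: Python fundamentals And Extra Topics/q6.py | create_zodiac_dictionary
-- ===== SOURCE A (Python) =====
-- def create_zodiac_dictionary(start_year, end_year):
--     years = {2000: "Dragon", 2001: "Snake", 2002: "Horse", 2003: "Goat", 2004: "Monkey", 2005: "Rooster", 2006: "Dog", 2007: "Pig", 2008: "Rat", 2009: "Ox", 2010: "Tiger", 2011: "Rabbit"}
--     returns = {}
--     for year in years.items():
--         matched_years = []
--         for number in range(start_year, end_year+1):
--             found_year = number - ((number - 2000) // 12) * 12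
--             if(found_year == year[0]):
--                 matched_years.append(number)
--         returns[f"{year[1]}"] = matched_years
--     return returns
-- ===== SOURCE B (Python) =====
-- def create_zodiac_dictionary(start_year, end_year):
--     years = {2000: "Dragon", 2001: "Snake", 2002: "Horse", 2003: "Goat", 2004: "Monkey", 2005: "Rooster", 2006: "Dog", 2007: "Pig", 2008: "Rat", 2009: "Ox", 2010: "Tiger", 2011: "Rabbit"}
--     result = {name: [] for name in years.values()}
--     for year in range(start_year, end_year + 1):
--         sign = years[2000 + (year - 2000) % 12]
--         result[sign].append(year)
--     return result
-- ===== Notes on version B (the rewrite author's own statement) =====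
-- stated objective: faster
-- what changed: Replaces the 12 full scans of the year range (one per zodiac sign) by a single pass that looks each year's sign up in the table and appends it to a pre-initialized per-sign list.
import Mathlib
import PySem

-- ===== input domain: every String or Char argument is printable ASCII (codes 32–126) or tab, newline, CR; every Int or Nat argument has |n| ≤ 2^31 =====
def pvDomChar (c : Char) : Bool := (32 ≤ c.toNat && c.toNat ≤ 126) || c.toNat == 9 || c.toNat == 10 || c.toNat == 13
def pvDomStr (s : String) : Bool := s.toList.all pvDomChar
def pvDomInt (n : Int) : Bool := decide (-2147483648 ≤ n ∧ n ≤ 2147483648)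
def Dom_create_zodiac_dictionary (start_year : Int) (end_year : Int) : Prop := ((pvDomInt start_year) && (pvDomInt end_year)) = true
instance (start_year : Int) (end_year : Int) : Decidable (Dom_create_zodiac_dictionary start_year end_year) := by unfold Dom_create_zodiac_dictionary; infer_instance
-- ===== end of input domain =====

-- B replaces A's twelve scans of the year range (one per zodiac sign) by a single pass
-- that looks each year's sign up in the table and appends to a pre-initialized per-sign list.

-- ===== PORT A =====
-- the literal `years` dict shared by A and B
def pvZodiacYears : PySem.Dict Int String :=
  PySem.Dict.ofList [(2000, "Dragon"), (2001, "Snake"), (2002, "Horse"), (2003, "Goat"),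
    (2004, "Monkey"), (2005, "Rooster"), (2006, "Dog"), (2007, "Pig"),
    (2008, "Rat"), (2009, "Ox"), (2010, "Tiger"), (2011, "Rabbit")]

def create_zodiac_dictionary (start_year : Int) (end_year : Int) : List (String × List Int) :=
  (pvZodiacYears.items.foldl
    (fun returns year =>
      returns.insert year.2
        ((PySem.List.pyRange start_year (end_year + 1) 1).foldl
          (fun acc number =>
            if (number - (PySem.Int.floordiv (number - 2000) 12) * 12) == year.1
            then acc ++ [number] else acc) []))
    PySem.Dict.empty).items

-- ===== PORT B =====
def create_zodiac_dictionary_alt (start_year : Int) (end_year : Int) : List (String × List Int) :=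
  ((PySem.List.pyRange start_year (end_year + 1) 1).foldl
    (fun result year =>
      result.modify (pvZodiacYears.getD (2000 + PySem.Int.mod (year - 2000) 12) "") [] (· ++ [year]))
    (pvZodiacYears.values.foldl
      (fun d name => d.insert name ([] : List Int)) PySem.Dict.empty)).items

-- ===== PRECONDITION & SPEC =====
def Spec_create_zodiac_dictionary (start_year : Int) (end_year : Int) (out : List (String × List Int)) : Prop := out = create_zodiac_dictionary_alt start_year end_year
instance (start_year : Int) (end_year : Int) (out : List (String × List Int)) : Decidable (Spec_create_zodiac_dictionary start_year end_year out) := by unfold Spec_create_zodiac_dictionary; infer_instance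

-- ===== CLAIM (what is proved, stated in full; the proofs are below) =====
def Claim_equal_create_zodiac_dictionary : Prop := ∀ (start_year : Int) (end_year : Int), Dom_create_zodiac_dictionary start_year end_year → Spec_create_zodiac_dictionary start_year end_year (create_zodiac_dictionary start_year end_year)

-- ===== LEMMAS AND PROOFS =====
def pvSign (n : Int) : String := pvZodiacYears.getD (2000 + PySem.Int.mod (n - 2000) 12) ""

def pvNames : List String :=
  ["Dragon", "Snake", "Horse", "Goat", "Monkey", "Rooster", "Dog", "Pig", "Rat", "Ox", "Tiger", "Rabbit"]

def pvInit : PySem.Dict String (List Int) :=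
  PySem.Dict.ofList (pvNames.map (fun nm => (nm, ([] : List Int))))

lemma pvSign_mem (n : Int) : pvSign n ∈ pvNames := by
  unfold pvSign
  rw [PySem.Int.mod_eq_emod_of_pos (by norm_num)]
  have h0 : 0 ≤ (n - 2000) % 12 := Int.emod_nonneg _ (by norm_num)
  have h1 : (n - 2000) % 12 < 12 := Int.emod_lt_of_pos _ (by norm_num)
  set r := (n - 2000) % 12 with hr
  clear_value r
  interval_cases r <;> decide

lemma pvPred_eq (k0 : Int) (nm : String) (h : (k0, nm) ∈ pvZodiacYears.items) (n : Int) :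
    ((n - (PySem.Int.floordiv (n - 2000) 12) * 12 == k0)) = (pvSign n == nm) := by
  have hk : n - (PySem.Int.floordiv (n - 2000) 12) * 12 = 2000 + PySem.Int.mod (n - 2000) 12 := by
    have := PySem.Int.floordiv_mul_add_mod (n - 2000) 12
    omega
  rw [hk]
  unfold pvSign
  rw [PySem.Int.mod_eq_emod_of_pos (by norm_num)]
  have h0 : 0 ≤ (n - 2000) % 12 := Int.emod_nonneg _ (by norm_num)
  have h1 : (n - 2000) % 12 < 12 := Int.emod_lt_of_pos _ (by norm_num)
  set r := (n - 2000) % 12 with hr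
  clear_value r
  fin_cases h <;> interval_cases r <;> decide

lemma pvInit_eq : pvZodiacYears.values.foldl (fun d name => d.insert name ([] : List Int)) PySem.Dict.empty = pvInit := by
  decide

lemma pvInit_keys : pvInit.keys = pvNames := by decide

lemma pvInit_nodup : pvInit.keys.Nodup := by decide

lemma pvInit_getD (nm : String) (h : nm ∈ pvNames) : pvInit.getD nm [] = [] := by
  fin_cases h <;> decide

lemma pvNames_eq : pvNames = pvZodiacYears.items.map (·.2) := by decide

lemma pvB_eq (L : List Int) :
    (L.foldl (fun result year => result.modify (pvSign year) [] (· ++ [year])) pvInit).items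
      = pvNames.map (fun nm => (nm, L.filter (fun y => pvSign y == nm))) := by
  have hfold : ∀ (d : PySem.Dict String (List Int)),
      L.foldl (fun r y => r.modify (pvSign y) [] (· ++ [y])) d
        = (L.map (fun y => (pvSign y, y))).foldl (fun r p => r.modify p.1 [] (· ++ [p.2])) d := by
    intro d
    rw [List.foldl_map]
  rw [hfold]
  have hnodup : ((L.map (fun y => (pvSign y, y))).foldl (fun r p => r.modify p.1 [] (· ++ [p.2])) pvInit).keys.Nodup := by
    have := PySem.Dict.nodup_keys_foldl_modify_key (L.map (fun y => (pvSign y, y))) Prod.fst [] (fun _ p => (· ++ [p.2])) pvInit pvInit_nodup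
    exact this
  have hkeys : ((L.map (fun y => (pvSign y, y))).foldl (fun r p => r.modify p.1 [] (· ++ [p.2])) pvInit).keys = pvNames := by
    have := PySem.Dict.keys_foldl_modify_key (key := Prod.fst) (l := L.map (fun y => (pvSign y, y))) (d0 := ([] : List Int)) (f := fun _ p => (· ++ [p.2])) (d := pvInit)
    rw [this, List.map_map, pvInit_keys]
    rw [PySem.Set.update_eq_append_filter]
    have : (PySem.Set.ofList (L.map (Prod.fst ∘ fun y => (pvSign y, y)))).filter (fun y => !(PySem.Set.contains pvNames y)) = [] := by
      rw [List.filter_eq_nil_iff]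
      intro a ha
      have ha' := (PySem.Set.mem_ofList _ _).1 ha
      simp only [List.mem_map] at ha'
      obtain ⟨y, _, hy⟩ := ha'
      have : a ∈ pvNames := by rw [← hy]; exact pvSign_mem y
      simp [PySem.Set.contains_eq_listContains, this]
    rw [this, List.append_nil]
  rw [PySem.Dict.items_eq_map_keys _ hnodup []]
  rw [hkeys]
  apply List.map_congr_left
  intro nm hnm
  rw [PySem.Dict.getD_foldl_modify_append]
  rw [pvInit_getD nm hnm]
  rw [List.filter_map, List.map_map]
  simp only [Function.comp_def]
  simp

lemma pvA_eq (L : List Int) :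
    (pvZodiacYears.items.foldl
      (fun returns year =>
        returns.insert year.2
          (L.foldl (fun acc number =>
            if (number - (PySem.Int.floordiv (number - 2000) 12) * 12) == year.1
            then acc ++ [number] else acc) []))
      PySem.Dict.empty).items
    = pvZodiacYears.items.map
        (fun p => (p.2, L.filter (fun n => (n - (PySem.Int.floordiv (n - 2000) 12) * 12) == p.1))) := by
  rw [PySem.Dict.items_foldl_insert_fresh pvZodiacYears.items (fun p => p.2)
      (fun p => L.foldl (fun acc number =>
        if (number - (PySem.Int.floordiv (number - 2000) 12) * 12) == p.1
        then acc ++ [number] else acc) []) PySem.Dict.empty (by decide) (by decide)]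
  simp only [PySem.List.foldl_append_if]
  simp
  decide

-- ===== VERDICT (by name: the statement is the Claim_ definition above) =====
theorem create_zodiac_dictionary_spec : Claim_equal_create_zodiac_dictionary := by
  intro s e _
  show create_zodiac_dictionary s e = create_zodiac_dictionary_alt s e
  unfold create_zodiac_dictionary create_zodiac_dictionary_alt
  rw [pvInit_eq, pvA_eq]
  have hsign : (fun (result : PySem.Dict String (List Int)) (year : Int) =>
  result.modify (pvZodiacYears.getD (2000 + PySem.Int.mod (year - 2000) 12) "") [] (· ++ [year]))
  = fun result year => result.modify (pvSign year) [] (· ++ [year]) := rfl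
  rw [hsign, pvB_eq, pvNames_eq, List.map_map]
  apply List.map_congr_left
  intro p hp
  simp only [Function.comp_def]
  congr 1
  apply List.filter_congr
  intro n hn
  exact pvPred_eq p.1 p.2 hp n
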